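-- pv_equiv track=rewrite | github.com/Mariel0000/FIFO-LIFO-RR | lifo.py | ejecutar_lifo
-- ===== SOURCE A (Python) =====
-- def ejecutar_lifo(ti, t):
--     n = len(ti)
--     tf = [0] * n
--     done = [False] * n
--     t_clock = 0
--     completados = 0
--
--     while completados < n:
--         encontrado = False
--         for i in range(n-1, -1, -1):
--             if not done[i] and ti[i] <= t_clock:
--                 t_clock += t[i]
--                 tf[i] = t_clock
--                 done[i] = True
--                 completados += 1
--                 encontrado = True
--                 break
--         if not encontrado:
--             t_clock += 1
--     return tf
-- ===== SOURCE B (Python) =====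
-- def ejecutar_lifo(ti, t):
--     # Pending jobs as an ascending index list: scan positions from the top for the
--     # first ready job (LIFO pick), pop it there; when none is ready, jump the clock
--     # straight to the earliest pending arrival instead of ticking one unit at a time.
--     n = len(ti)
--     tf = [0] * n
--     pend = list(range(n))
--     clock = 0
--     while pend:
--         pos = next((k for k in range(len(pend) - 1, -1, -1)
--                     if ti[pend[k]] <= clock), -1)
--         if pos >= 0:
--             i = pend.pop(pos)
--             clock += t[i]
--             tf[i] = clock
--         else:
--             clock = min(ti[j] for j in pend)
--     return tf
-- ===== Notes on version B (the rewrite author's own statement) =====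
-- stated objective: alternative
-- what changed: B keeps a pending-index list, picks the LIFO job by scanning positions from the top of that list and popping it there, and jumps the clock directly to the earliest pending arrival when no job is ready, instead of A's done-flag array rescanned over all n indices each round and one-unit clock ticks while idle.
import Mathlib
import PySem

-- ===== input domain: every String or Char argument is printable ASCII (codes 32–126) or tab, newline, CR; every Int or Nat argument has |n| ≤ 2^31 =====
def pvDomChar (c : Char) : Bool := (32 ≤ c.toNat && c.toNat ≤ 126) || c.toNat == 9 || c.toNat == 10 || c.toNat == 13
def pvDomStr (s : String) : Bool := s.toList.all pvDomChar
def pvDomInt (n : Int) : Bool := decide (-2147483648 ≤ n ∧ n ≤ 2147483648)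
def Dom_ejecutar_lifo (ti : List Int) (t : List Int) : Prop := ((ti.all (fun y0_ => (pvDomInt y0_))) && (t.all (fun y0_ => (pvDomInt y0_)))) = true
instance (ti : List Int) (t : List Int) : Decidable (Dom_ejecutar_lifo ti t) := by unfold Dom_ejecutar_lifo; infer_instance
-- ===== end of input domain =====

-- ===== PORT A =====
-- B replaces A's done-flag array, full reverse scan and one-unit idle ticks by a
-- pending-index list (top-down position scan + pop = LIFO pick) and a clock jump
-- to the earliest pending arrival (objective: alternative algorithm without the
-- pseudo-polynomial idle ticking).

-- the inner 'for i in range(n-1,-1,-1): ... break' scan: first ready undone index from the top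
def scanA (ti : List Int) (done : List Bool) (t_clock : Int) : Option Nat :=
  (List.range ti.length).reverse.find? (fun i => !(done.getD i true) && decide (ti.getD i 0 ≤ t_clock))

def pvMaxA (ti : List Int) : Int := ti.foldr max 0

theorem pv_mem_le_foldrMax (x : Int) (l : List Int) (h : x ∈ l) : x ≤ pvMaxA l := by
  induction l with
  | nil => cases h
  | cons a l ih =>
    simp only [pvMaxA, List.foldr_cons] at *
    rcases List.mem_cons.mp h with h | h
    · exact h ▸ le_max_left _ _
    · exact le_trans (ih h) (le_max_right _ _)

theorem pv_count_add (l : List Bool) : l.count true + l.count false = l.length := by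
  induction l with
  | nil => simp
  | cons a l ih => cases a <;> simp <;> omega

theorem pv_exists_undone (done : List Bool) (h : done.count false ≠ 0) :
    ∃ i, i < done.length ∧ done.getD i true = false := by
  have hm : false ∈ done := List.count_pos_iff.mp (Nat.pos_of_ne_zero h)
  obtain ⟨i, hi, hgi⟩ := List.mem_iff_getElem.mp hm
  exact ⟨i, hi, by simp [List.getD_eq_getElem?_getD, List.getElem?_eq_getElem hi, hgi]⟩

theorem pv_scanA_some (ti : List Int) (done : List Bool) (c : Int) (i : Nat)
    (h : scanA ti done c = some i) :
    i < ti.length ∧ done.getD i true = false ∧ ti.getD i 0 ≤ c := by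
  have hmem := List.mem_of_find?_eq_some h
  have hp := List.find?_some h
  simp only [Bool.and_eq_true, Bool.not_eq_true', decide_eq_true_eq] at hp
  simp only [List.mem_reverse, List.mem_range] at hmem
  exact ⟨hmem, hp.1, hp.2⟩

theorem pv_scanA_none (ti : List Int) (done : List Bool) (c : Int)
    (h : scanA ti done c = none) :
    ∀ i, i < ti.length → done.getD i true = false → c < ti.getD i 0 := by
  intro i hi hd
  have := List.find?_eq_none.mp h i (by simp [hi])
  simp only [Bool.and_eq_true, Bool.not_eq_true', decide_eq_true_eq, not_and] at this
  exact lt_of_not_ge (this hd)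

theorem pv_countTrue_set (l : List Bool) (i : Nat) (hi : i < l.length)
    (hf : l.getD i true = false) :
    (l.set i true).count true = l.count true + 1 := by
  have hgi : l[i] = false := by
    simpa [List.getD_eq_getElem?_getD, List.getElem?_eq_getElem hi] using hf
  have hcs := List.count_set (a := true) (b := true) (l := l) (i := i) hi
  simp [hgi] at hcs
  exact hcs

theorem pv_countFalse_set (l : List Bool) (i : Nat) (hi : i < l.length)
    (hf : l.getD i true = false) : (l.set i true).count false < l.count false := by
  have hgi : l[i] = false := by
    simpa [List.getD_eq_getElem?_getD, List.getElem?_eq_getElem hi] using hf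
  have hmem : false ∈ l := hgi ▸ l.getElem_mem hi
  have hpos : 0 < l.count false := List.count_pos_iff.mpr hmem
  have hcs := List.count_set (a := true) (b := false) (l := l) (i := i) hi
  simp [hgi] at hcs
  omega

-- the outer 'while completados < n' loop; the two hypothesis arguments only justify
-- termination (they are invariants of A's loop, not extra computation)
def loopA (ti t : List Int) (tf : List Int) (done : List Bool) (t_clock : Int)
    (completados : Int) (hlen : done.length = ti.length)
    (hc : completados = (done.count true : Int)) : List Int :=
  if hlt : completados < (ti.length : Int) then
    match hs : scanA ti done t_clock with
    | some i =>
        let c' := t_clock + t.getD i 0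
        loopA ti t (tf.set i c') (done.set i true) c' (completados + 1)
          (by simpa using hlen)
          (by
            obtain ⟨hi, hf, _⟩ := pv_scanA_some ti done t_clock i hs
            rw [hc, pv_countTrue_set done i (hlen ▸ hi) hf]
            push_cast
            ring)
    | none => loopA ti t tf done (t_clock + 1) completados hlen hc
  else tf
termination_by (done.count false, (pvMaxA ti - t_clock).toNat)
decreasing_by
  · left
    obtain ⟨hi, hf, _⟩ := pv_scanA_some ti done t_clock i hs
    exact pv_countFalse_set done i (hlen ▸ hi) hf
  · right
    have hne : done.count false ≠ 0 := by
      have := pv_count_add done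
      omega
    obtain ⟨j, hj, hjf⟩ := pv_exists_undone done hne
    have hjt : t_clock < ti.getD j 0 := pv_scanA_none ti done t_clock hs j (hlen ▸ hj) hjf
    have hj' : j < ti.length := hlen ▸ hj
    have hmem : ti.getD j 0 ∈ ti := by
      have he : ti.getD j 0 = ti[j] := by
        simp [List.getD_eq_getElem?_getD, List.getElem?_eq_getElem hj']
      rw [he]; exact ti.getElem_mem hj'
    have := pv_mem_le_foldrMax _ ti hmem
    omega

def ejecutar_lifo (ti : List Int) (t : List Int) : List Int :=
  loopA ti t (List.replicate ti.length 0) (List.replicate ti.length false) 0 0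
    (by simp) (by simp [List.count_replicate])

-- ===== PORT B =====
-- min(ti[j] for j in pend)  (Python min of a nonempty generator)
def minArrB (ti : List Int) (pend : List Nat) : Int :=
  (PySem.List.min? (pend.map (fun j => ti.getD j 0)) (fun x => x)).getD 0

theorem pv_minArrB_le (ti : List Int) (pend : List Nat) (hne : pend ≠ []) :
    ∃ j ∈ pend, ti.getD j 0 ≤ minArrB ti pend := by
  have hmne : pend.map (fun j => ti.getD j 0) ≠ [] := by simpa using hne
  cases hm : PySem.List.min? (pend.map (fun j => ti.getD j 0)) (fun x => x) with
  | none => exact absurd ((PySem.List.min?_eq_none_iff _ _).mp hm) hmne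
  | some m =>
    obtain ⟨j, hj, hje⟩ := List.mem_map.mp (PySem.List.min?_mem hm)
    refine ⟨j, hj, ?_⟩
    unfold minArrB
    rw [hm, Option.getD_some, hje]

theorem pv_ready_nonempty_after_jump (ti : List Int) (pend : List Nat) (hne : pend ≠ []) :
    pend.filter (fun i => decide (ti.getD i 0 ≤ minArrB ti pend)) ≠ [] := by
  obtain ⟨j, hj, hle⟩ := pv_minArrB_le ti pend hne
  intro hemp
  have := List.filter_eq_nil_iff.mp hemp j hj
  simp only [decide_eq_true_eq] at this
  exact this hle

-- next((k for k in range(len(pend)-1, -1, -1) if ti[pend[k]] <= clock), -1):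
-- the first ready POSITION from the top of pend (none = Python's -1 sentinel)
def posB (ti : List Int) (pend : List Nat) (clock : Int) : Option Nat :=
  (List.range pend.length).reverse.find? (fun k => decide (ti.getD (pend.getD k 0) 0 ≤ clock))

theorem pv_posB_lt (ti : List Int) (pend : List Nat) (c : Int) (pos : Nat)
    (h : posB ti pend c = some pos) : pos < pend.length := by
  have := List.mem_of_find?_eq_some h
  simpa using this

theorem pv_posB_none_iff (ti : List Int) (pend : List Nat) (c : Int) :
    posB ti pend c = none ↔ pend.filter (fun j => decide (ti.getD j 0 ≤ c)) = [] := by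
  constructor
  · intro h
    apply List.filter_eq_nil_iff.mpr
    intro j hj
    obtain ⟨k, hk, hkj⟩ := List.mem_iff_getElem.mp hj
    have := List.find?_eq_none.mp h k (by simp [hk])
    simp only [decide_eq_true_eq] at this ⊢
    have hgd : pend.getD k 0 = j := by
      simp [List.getD_eq_getElem?_getD, List.getElem?_eq_getElem hk, hkj]
    rw [hgd] at this
    exact this
  · intro h
    cases hp : posB ti pend c with
    | none => rfl
    | some pos =>
      exfalso
      have hlt := pv_posB_lt ti pend c pos hp
      have hpr := List.find?_some hp
      simp only [decide_eq_true_eq] at hpr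
      have hmem : pend.getD pos 0 ∈ pend := by
        have he : pend.getD pos 0 = pend[pos] := by
          simp [List.getD_eq_getElem?_getD, List.getElem?_eq_getElem hlt]
        rw [he]; exact pend.getElem_mem hlt
      have := List.filter_eq_nil_iff.mp h _ hmem
      simp only [decide_eq_true_eq] at this
      exact this hpr

def loopB (ti t : List Int) (tf : List Int) (pend : List Nat) (clock : Int) : List Int :=
  if pend.isEmpty then tf
  else
    match _hr : posB ti pend clock with
    | some pos =>
        -- i = pend.pop(pos): exact since pos < len(pend) (PySem.List.pop?_natCast)
        let i := pend.getD pos 0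
        let c' := clock + t.getD i 0
        loopB ti t (tf.set i c') (pend.eraseIdx pos) c'
    | none => loopB ti t tf pend (minArrB ti pend)
termination_by (pend.length * 2 + (if (pend.filter (fun i => decide (ti.getD i 0 ≤ clock))).isEmpty then 1 else 0))
decreasing_by
  · have hlt : pos < pend.length := pv_posB_lt ti pend clock pos _hr
    have hel : (pend.eraseIdx pos).length = pend.length - 1 := by
      rw [List.length_eraseIdx]; simp [hlt]
    have h1 : ∀ (c : Prop) [inst : Decidable c], (if c then 1 else 0) ≤ 1 := by
      intro c inst; split <;> omega
    have := h1 (((pend.eraseIdx pos).filter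
      (fun j => decide (ti.getD j 0 ≤ clock + t.getD (pend.getD pos 0) 0))).isEmpty = true)
    omega
  · rename_i hne
    have hpe : pend ≠ [] := by simpa [List.isEmpty_iff] using hne
    have h1 : (pend.filter (fun i => decide (ti.getD i 0 ≤ clock))).isEmpty = true :=
      List.isEmpty_iff.mpr ((pv_posB_none_iff ti pend clock).mp _hr)
    have h2 : (pend.filter (fun i => decide (ti.getD i 0 ≤ minArrB ti pend))).isEmpty = false := by
      simpa [List.isEmpty_iff] using pv_ready_nonempty_after_jump ti pend hpe
    rw [h1, h2]
    simp

def ejecutar_lifo_alt (ti : List Int) (t : List Int) : List Int :=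
  loopB ti t (List.replicate ti.length 0) (List.range ti.length) 0

-- ===== PRECONDITION & SPEC =====
-- Pre_ excludes exactly the inputs on which Python A raises IndexError: len(t) < len(ti) (t[i] out of range)
def Pre_ejecutar_lifo (ti : List Int) (t : List Int) : Prop := ti.length ≤ t.length
instance (ti : List Int) (t : List Int) : Decidable (Pre_ejecutar_lifo ti t) := by
  unfold Pre_ejecutar_lifo; infer_instance

def pvWitness_ejecutar_lifo : List Int × List Int := ([2, 0, 5], [3, 1, 2])

def Spec_ejecutar_lifo (ti : List Int) (t : List Int) (out : List Int) : Prop := out = ejecutar_lifo_alt ti t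
instance (ti : List Int) (t : List Int) (out : List Int) : Decidable (Spec_ejecutar_lifo ti t out) := by unfold Spec_ejecutar_lifo; infer_instance

-- ===== CLAIM (what is proved, stated in full; the proofs are below) =====
def Claim_equal_ejecutar_lifo : Prop := ∀ (ti : List Int) (t : List Int), Dom_ejecutar_lifo ti t → Pre_ejecutar_lifo ti t → Spec_ejecutar_lifo ti t (ejecutar_lifo ti t)

-- ===== LEMMAS AND PROOFS =====

theorem pv_minArrB_isMin (ti : List Int) (pend : List Nat) (hne : pend ≠ []) :
    ∀ j ∈ pend, minArrB ti pend ≤ ti.getD j 0 := by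
  intro j hj
  have hmne : pend.map (fun j => ti.getD j 0) ≠ [] := by simpa using hne
  cases hm : PySem.List.min? (pend.map (fun j => ti.getD j 0)) (fun x => x) with
  | none => exact absurd ((PySem.List.min?_eq_none_iff _ _).mp hm) hmne
  | some m =>
    have h := PySem.List.min?_isMin hm (ti.getD j 0) (List.mem_map_of_mem hj)
    unfold minArrB
    rw [hm, Option.getD_some]
    simpa using h

-- the pending list of B corresponding to A's done-flag array
def undoneL (done : List Bool) : List Nat :=
  (List.range done.length).filter (fun j => !(done.getD j true))

theorem pv_find_head {α : Type} (m : List α) (p : α → Bool) :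
    m.find? p = (m.filter p).head? := by
  induction m with
  | nil => simp
  | cons a m ih =>
    cases h : p a with
    | true => simp [h]
    | false =>
      rw [List.find?_cons_of_neg (by simp [h]), List.filter_cons_of_neg (by simp [h]), ih]

theorem pv_find_reverse {α : Type} (l : List α) (p : α → Bool) :
    l.reverse.find? p = (l.filter p).getLast? := by
  rw [List.getLast?_eq_head?_reverse, ← List.filter_reverse, pv_find_head]

theorem pv_scan_ready (ti : List Int) (done : List Bool) (c : Int)
    (hlen : done.length = ti.length) :
    scanA ti done c
      = ((undoneL done).filter (fun i => decide (ti.getD i 0 ≤ c))).getLast? := by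
  unfold scanA undoneL
  rw [pv_find_reverse, hlen, List.filter_filter]
  congr 1
  apply List.filter_congr
  intro j _
  exact Bool.and_comm _ _

theorem pv_set_filter (done : List Bool) (i : Nat) (hi : i < done.length) :
    undoneL (done.set i true)
      = (undoneL done).filter (fun j => decide (j ≠ i)) := by
  unfold undoneL
  rw [List.length_set, List.filter_filter]
  apply List.filter_congr
  intro j hj
  have hj' : j < done.length := List.mem_range.mp hj
  by_cases hji : j = i
  · subst hji
    simp [List.getD_eq_getElem?_getD, hi]
  · simp [List.getD_eq_getElem?_getD, List.getElem?_set_ne (by omega : i ≠ j), hji]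

theorem pv_undone_empty (done : List Bool) (h : done.count false = 0) :
    undoneL done = [] := by
  apply List.filter_eq_nil_iff.mpr
  intro j hj
  have hj' : j < done.length := List.mem_range.mp hj
  have hgi : done[j] = true := by
    cases hgj : done[j] with
    | false =>
      exfalso
      have hmem : false ∈ done := hgj ▸ done.getElem_mem hj'
      have := List.count_pos_iff.mpr hmem
      omega
    | true => rfl
  simp [List.getD_eq_getElem?_getD, List.getElem?_eq_getElem hj', hgi]

theorem pv_undone_mem (done : List Bool) (i : Nat) (hi : i < done.length)
    (hf : done.getD i true = false) : i ∈ undoneL done := by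
  have hgi : done[i] = false := by
    simpa [List.getD_eq_getElem?_getD, List.getElem?_eq_getElem hi] using hf
  unfold undoneL
  simp [List.mem_filter, List.mem_range, hi, List.getD_eq_getElem?_getD, hgi]

theorem pv_nodup_undone (done : List Bool) : (undoneL done).Nodup :=
  List.Nodup.filter _ List.nodup_range

theorem pv_filter_last_pos (pend : List Nat) (p : Nat → Bool) :
    (pend.filter p).getLast?
      = (((List.range pend.length).filter (fun k => p (pend.getD k 0))).getLast?).map
          (fun k => pend.getD k 0) := by
  induction pend using List.reverseRecOn with
  | nil => simp
  | append_singleton l a ih =>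
    have hlen : (l ++ [a]).length = l.length + 1 := by simp
    have hga : (l ++ [a]).getD l.length 0 = a := by simp
    have hcong : (List.range l.length).filter (fun k => p ((l ++ [a]).getD k 0))
        = (List.range l.length).filter (fun k => p (l.getD k 0)) := by
      apply List.filter_congr
      intro k hk
      rw [List.getD_append _ _ _ _ (List.mem_range.mp hk)]
    cases hpa : p a with
    | true =>
      have lhs : ((l ++ [a]).filter p).getLast? = some a := by
        rw [List.filter_append]
        simp [hpa]
      have rhs1 : (List.range (l ++ [a]).length).filter (fun k => p ((l ++ [a]).getD k 0))
          = (List.range l.length).filter (fun k => p ((l ++ [a]).getD k 0)) ++ [l.length] := by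
        rw [hlen, List.range_succ, List.filter_append]
        simp [hpa]
      rw [lhs, rhs1, List.getLast?_concat]
      simp
    | false =>
      have lhs : ((l ++ [a]).filter p).getLast? = (l.filter p).getLast? := by
        rw [List.filter_append]
        simp [hpa]
      have rhs1 : (List.range (l ++ [a]).length).filter (fun k => p ((l ++ [a]).getD k 0))
          = (List.range l.length).filter (fun k => p (l.getD k 0)) := by
        rw [hlen, List.range_succ, List.filter_append, hcong]
        simp [hpa]
      rw [lhs, rhs1, ih]
      cases hL : ((List.range l.length).filter (fun k => p (l.getD k 0))).getLast? with
      | none => simp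
      | some k =>
        have hk : k < l.length := by
          have := List.mem_of_mem_filter (List.mem_of_getLast? hL)
          simpa using this
        simp [List.getElem?_append_left hk]

theorem pv_posB_some (ti : List Int) (pend : List Nat) (c : Int) (pos : Nat)
    (h : posB ti pend c = some pos) :
    (pend.filter (fun j => decide (ti.getD j 0 ≤ c))).getLast? = some (pend.getD pos 0) := by
  unfold posB at h
  rw [pv_find_reverse] at h
  rw [pv_filter_last_pos, h]
  rfl

theorem pv_eraseIdx_filter (l : List Nat) (pos : Nat) (hp : pos < l.length) (hnd : l.Nodup) :
    l.eraseIdx pos = l.filter (fun j => decide (j ≠ l.getD pos 0)) := by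
  have hge : l.getD pos 0 = l[pos] := by
    simp [List.getD_eq_getElem?_getD, List.getElem?_eq_getElem hp]
  rw [hge, ← List.Nodup.erase_getElem hnd pos hp, List.Nodup.erase_eq_filter hnd]
  apply List.filter_congr
  intro j _
  simp [Ne, decide_not, bne, beq_eq_decide]

-- Main simulation lemma: A's loop equals B's loop on aligned states
theorem pv_main (ti t : List Int) (tf : List Int) (done : List Bool) (t_clock : Int)
    (completados : Int) (hlen : done.length = ti.length)
    (hc : completados = (done.count true : Int)) :
    loopA ti t tf done t_clock completados hlen hc = loopB ti t tf (undoneL done) t_clock := by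
  induction tf, done, t_clock, completados, hlen, hc using loopA.induct ti t with
  | case1 tf done t_clock hlen i hs c' hlt ih =>
    obtain ⟨hi, hf, hle⟩ := pv_scanA_some ti done t_clock i hs
    have hi' : i < done.length := hlen ▸ hi
    have hmem : i ∈ undoneL done := pv_undone_mem done i hi' hf
    have hpe : undoneL done ≠ [] := List.ne_nil_of_mem hmem
    have hready : ((undoneL done).filter (fun j => decide (ti.getD j 0 ≤ t_clock))).getLast?
        = some i := by
      rw [← pv_scan_ready ti done t_clock hlen]; exact hs
    rw [loopA, dif_pos hlt, loopB, if_neg (by simp [List.isEmpty_iff, hpe])]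
    split
    · rename_i i' heq
      rw [hs] at heq
      injection heq with heq'
      subst heq'
      split
      · rename_i pos heq2
        have hval : (undoneL done).getD pos 0 = i := by
          have h := pv_posB_some ti (undoneL done) t_clock pos heq2
          rw [hready] at h
          exact (Option.some.inj h).symm
        have hplt : pos < (undoneL done).length := pv_posB_lt ti (undoneL done) t_clock pos heq2
        have herase : (undoneL done).eraseIdx pos
            = (undoneL done).filter (fun j => decide (j ≠ i)) := by
          rw [pv_eraseIdx_filter (undoneL done) pos hplt (pv_nodup_undone done), hval]
        rw [ih, pv_set_filter done i hi', hval, herase]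
      · rename_i heq2
        have hfil := (pv_posB_none_iff ti (undoneL done) t_clock).mp heq2
        rw [hfil] at hready
        exact absurd hready (by simp)
    · rename_i heq
      rw [hs] at heq
      exact absurd heq (by simp)
  | case2 tf done t_clock hlen hs hlt ih =>
    have hne : done.count false ≠ 0 := by
      have h1 := pv_count_add done
      have h2 : List.count true done < ti.length := by exact_mod_cast hlt
      omega
    obtain ⟨j0, hj0, hj0f⟩ := pv_exists_undone done hne
    have hpe : undoneL done ≠ [] := List.ne_nil_of_mem (pv_undone_mem done j0 hj0 hj0f)
    have hready0 : ((undoneL done).filter (fun j => decide (ti.getD j 0 ≤ t_clock))).getLast?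
        = none := by
      rw [← pv_scan_ready ti done t_clock hlen]; exact hs
    have hfil0 : (undoneL done).filter (fun j => decide (ti.getD j 0 ≤ t_clock)) = [] :=
      List.getLast?_eq_none_iff.mp hready0
    have hall : ∀ j ∈ undoneL done, t_clock < ti.getD j 0 := by
      intro j hj
      have := List.filter_eq_nil_iff.mp hfil0 j hj
      simp only [decide_eq_true_eq] at this
      omega
    rw [loopA, dif_pos hlt]
    split
    · rename_i i' heq
      rw [hs] at heq
      exact absurd heq (by simp)
    · rename_i heq
      rw [ih]
      conv_rhs => rw [loopB]
      rw [if_neg (by simp [List.isEmpty_iff, hpe])]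
      split
      · rename_i pos heq2
        have hnone := (pv_posB_none_iff ti (undoneL done) t_clock).mpr hfil0
        rw [hnone] at heq2
        exact absurd heq2 (by simp)
      · rename_i heq2
        cases hready1 : posB ti (undoneL done) (t_clock + 1) with
        | some pos =>
          have hmin : minArrB ti (undoneL done) = t_clock + 1 := by
            have hgl := pv_posB_some ti (undoneL done) (t_clock + 1) pos hready1
            have hjf := List.mem_of_getLast? hgl
            have hjm : (undoneL done).getD pos 0 ∈ undoneL done := List.mem_of_mem_filter hjf
            have hjle : ti.getD ((undoneL done).getD pos 0) 0 ≤ t_clock + 1 := by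
              have := List.of_mem_filter hjf
              simpa using this
            obtain ⟨k, hk, hkle⟩ := pv_minArrB_le ti (undoneL done) hpe
            have h1 := pv_minArrB_isMin ti (undoneL done) hpe _ hjm
            have h2 := hall k hk
            have h3 := hall _ hjm
            omega
          rw [hmin]
        | none =>
          conv_lhs => rw [loopB]
          rw [if_neg (by simp [List.isEmpty_iff, hpe])]
          split
          · rename_i pos hk
            rw [hready1] at hk
            exact absurd hk (by simp)
          · rfl
  | case3 tf done t_clock hlen hlt =>
    have h1 := pv_count_add done
    have h2 : List.count true done ≤ done.length := List.count_le_length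
    have h3 : ¬ (List.count true done < ti.length) := by
      intro h; exact hlt (by exact_mod_cast h)
    have h0 : done.count false = 0 := by omega
    rw [loopA]
    rw [dif_neg hlt]
    rw [pv_undone_empty done h0, loopB]
    simp

-- ===== VERDICT (by name: the statement is the Claim_ definition above) =====
theorem ejecutar_lifo_spec : Claim_equal_ejecutar_lifo := by
  intro ti t _ _
  unfold Spec_ejecutar_lifo ejecutar_lifo ejecutar_lifo_alt
  rw [pv_main]
  congr 1
  unfold undoneL
  simp [List.filter_eq_self]
  intro a ha
  simp [ha]
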